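-- pv_equiv track=rewrite | github.com/doublemover/Slopjective-C | tmp/planning/source_hygiene/build_artifact_authenticity_classification_summary.py | match_globs
-- ===== SOURCE A (Python) =====
-- import fnmatch
--
-- def match_globs(paths: list[str], globs: list[str]) -> list[str]:
--     matched = set()
--     for path in paths:
--         for pattern in globs:
--             if fnmatch.fnmatch(path, pattern):
--                 matched.add(path)
--                 break
--     return sorted(matched)
-- ===== SOURCE B (Python) =====
-- # Hand-compiled glob matching: each pattern is compiled once to a token list and
-- # matched with an iterative dynamic-programming scan (no regexes, no backtracking).
-- # Character classes take their plain meaning: a range lo-hi matches lo <= c <= hi.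
--
-- STAR = ('star',)
-- ANY = ('any',)
--
--
-- def _translate(pat: str):
--     """Compile a shell glob into tokens ('lit', c) / ('any',) / ('star',) /
--     ('cls', negated, ranges) with ranges a list of (lo, hi) pairs."""
--     toks = []
--     i, n = 0, len(pat)
--     while i < n:
--         c = pat[i]
--         i += 1
--         if c == '*':
--             toks.append(STAR)
--         elif c == '?':
--             toks.append(ANY)
--         elif c == '[':
--             j = i
--             if j < n and pat[j] == '!':
--                 j += 1
--             if j < n and pat[j] == ']':
--                 j += 1
--             while j < n and pat[j] != ']':
--                 j += 1
--             if j >= n: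
--                 toks.append(('lit', '['))
--             else:
--                 neg = pat[i] == '!'
--                 body = pat[i + 1:j] if neg else pat[i:j]
--                 ranges = []
--                 k = 0
--                 while k < len(body):
--                     if k + 2 < len(body) and body[k + 1] == '-':
--                         ranges.append((body[k], body[k + 2]))
--                         k += 3
--                     else:
--                         ranges.append((body[k], body[k]))
--                         k += 1
--                 toks.append(('cls', neg, ranges))
--                 i = j + 1
--         else:
--             toks.append(('lit', c))
--     return toks
--
--
-- def _consume(tok, x: str) -> bool:
--     kind = tok[0]
--     if kind == 'lit':
--         return x == tok[1]
--     if kind == 'any' or kind == 'star':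
--         return True
--     _, neg, ranges = tok
--     return any(lo <= x <= hi for lo, hi in ranges) != neg
--
--
-- def _match(toks, s: str) -> bool:
--     """dp[j] == 'toks[j:] matches the current suffix of s'; suffixes shortest first."""
--     m = len(toks)
--     dp = [False] * (m + 1)
--     dp[m] = True
--     for j in range(m - 1, -1, -1):
--         dp[j] = dp[j + 1] if toks[j] is STAR else False
--     for i in range(len(s) - 1, -1, -1):
--         ndp = [False] * (m + 1)
--         for j in range(m - 1, -1, -1):
--             if toks[j] is STAR:
--                 ndp[j] = ndp[j + 1] or dp[j]
--             else:
--                 ndp[j] = _consume(toks[j], s[i]) and dp[j + 1]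
--         dp = ndp
--     return dp[0]
--
--
-- def match_globs(paths: list[str], globs: list[str]) -> list[str]:
--     matched = set()
--     for pattern in globs:
--         toks = _translate(pattern)
--         matched.update(p for p in paths if _match(toks, p))
--     return sorted(matched)
-- ===== Notes on version B (the rewrite author's own statement) =====
-- stated objective: alternative
-- what changed: B iterates glob-first and replaces fnmatch's regex machinery with its own compiler (each glob becomes a token list whose character classes are plain (lo,hi) ranges) plus an iterative dynamic-programming matcher over token/suffix pairs; Pre_ excludes globs whose bracket classes contain a reversed (empty) range such as '[b-a!]', an unspecified corner where fnmatch's internal chunk-merging gives the class an accidental meaning while B gives empty ranges their plain match-nothing meaning.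
-- outside the precondition, e.g. on match_globs(['z'], ['[b-a!]']): A returns ['z'], B returns []
import Mathlib
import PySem

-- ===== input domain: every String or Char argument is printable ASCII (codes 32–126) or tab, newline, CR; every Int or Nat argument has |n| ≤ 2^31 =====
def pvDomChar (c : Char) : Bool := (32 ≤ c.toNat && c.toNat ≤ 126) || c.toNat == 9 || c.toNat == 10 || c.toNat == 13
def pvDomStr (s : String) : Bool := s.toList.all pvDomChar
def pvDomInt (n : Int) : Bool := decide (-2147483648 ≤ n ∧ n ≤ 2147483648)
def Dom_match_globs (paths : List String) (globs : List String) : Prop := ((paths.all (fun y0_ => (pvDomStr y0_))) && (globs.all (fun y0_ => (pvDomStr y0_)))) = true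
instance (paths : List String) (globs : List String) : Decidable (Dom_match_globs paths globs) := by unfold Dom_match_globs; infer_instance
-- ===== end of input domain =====

-- B replaces the regex machinery behind fnmatch with its own glob compiler (classes as
-- plain (lo,hi) ranges) and an iterative dynamic-programming matcher, and iterates
-- glob-first; Pre_ excludes globs whose classes contain a reversed range, an
-- unspecified corner where fnmatch's internal chunk-merging and B's plain reading
-- are both defensible.

-- ===== PORT A =====
-- Model of the standard library's fnmatch.fnmatch (POSIX normcase = identity),
-- with fnmatch.translate's exact pattern compilation (CPython's chunk splitting and
-- empty-range merging for character classes); matching is language membership of the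
-- translated regex (exact for the regexes translate emits: literals, '.', '.*', classes).
inductive PvItem
  | single : Char → PvItem
  | range : Char → Char → PvItem
deriving DecidableEq, Repr

inductive PvTok
  | lit : Char → PvTok
  | any : PvTok
  | star : PvTok
  | never : PvTok
  | cls : Bool → List PvItem → PvTok
deriving DecidableEq, Repr

-- CPython translate: split the class body at range hyphens (the first search starts 1
-- char in, 2 after '!', and 2 after each found hyphen); an empty trailing chunk folds a
-- literal '-' into the previous one.
def pvChunks (fuel : Nat) (s : List Char) (skip : Nat) : List (List Char) :=
  match fuel with
  | 0 => [s]
  | fuel + 1 =>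
    match ((s.drop skip).findIdx? (fun c => c == '-')).map (· + skip) with
    | none => [s]
    | some k =>
      match pvChunks fuel (s.drop (k + 1)) 2 with
      | [[]] => [s.take k ++ ['-']]
      | rest => s.take k :: rest

-- CPython translate: remove empty ranges right-to-left (chunks[k-1][-1] > chunks[k][0]).
def pvMerge : List (List Char) → List (List Char)
  | [] => []
  | [c] => [c]
  | c :: d0 :: rest =>
    match pvMerge (d0 :: rest) with
    | [] => [c]
    | d :: r' =>
      if d.headD ' ' < c.getLastD ' ' then (c.dropLast ++ d.drop 1) :: r' else c :: d :: r'

-- chunk chars are literals; each join hyphen is the range last-of-left .. first-of-right.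
def pvItemsOf : List (List Char) → List PvItem
  | [] => []
  | [c] => c.map PvItem.single
  | c :: d :: rest =>
    c.map PvItem.single ++
      (match c.getLast?, d.head? with
       | some a, some b => [PvItem.range a b]
       | _, _ => [PvItem.single '-']) ++
      pvItemsOf (d :: rest)

def pvClassTok (stuff : List Char) : PvTok :=
  let chunks :=
    if stuff.contains '-' then
      pvMerge (pvChunks (stuff.length + 1) stuff (if stuff.head? = some '!' then 2 else 1))
    else [stuff]
  let total := chunks.flatten
  if total = [] then PvTok.never
  else if total = ['!'] then PvTok.any
  else
    let neg := total.head? = some '!'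
    let cs := if neg then chunks.modifyHead (List.drop 1) else chunks
    PvTok.cls neg (pvItemsOf cs)

def pvParse (fuel : Nat) (pat : List Char) : List PvTok :=
  match fuel, pat with
  | 0, _ => []
  | _, [] => []
  | fuel + 1, c :: rest =>
    if c = '*' then PvTok.star :: pvParse fuel rest
    else if c = '?' then PvTok.any :: pvParse fuel rest
    else if c = '[' then
      let s1 := if rest.head? = some '!' then 1 else 0
      let s2 := if (rest.drop s1).head? = some ']' then 1 else 0
      match (rest.drop (s1 + s2)).findIdx? (fun x => x == ']') with
      | none => PvTok.lit '[' :: pvParse fuel rest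
      | some m =>
        pvClassTok (rest.take (s1 + s2 + m)) :: pvParse fuel (rest.drop (s1 + s2 + m + 1))
    else PvTok.lit c :: pvParse fuel rest

def pvTokConsume : PvTok → Char → Bool
  | PvTok.lit c, x => x == c
  | PvTok.any, _ => true
  | PvTok.star, _ => true
  | PvTok.never, _ => false
  | PvTok.cls neg items, x =>
    (items.any (fun it =>
      match it with
      | PvItem.single c => x == c
      | PvItem.range a b => decide (a ≤ x) && decide (x ≤ b))) != neg

-- language membership for the translated regex: '.*' may match the empty suffix or
-- consume one character; every other element consumes exactly one matching character.
def pvMatchA : List PvTok → List Char → Bool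
  | [], s => s.isEmpty
  | t :: ts, s =>
    if t = PvTok.star then
      pvMatchA ts s ||
        (match s with
         | [] => false
         | _ :: s' => pvMatchA (t :: ts) s')
    else
      match s with
      | [] => false
      | c :: s' => pvTokConsume t c && pvMatchA ts s'
termination_by ts s => (s.length, ts.length)

def pvFnmatch (name : String) (pat : String) : Bool :=
  pvMatchA (pvParse (pat.toList.length + 1) pat.toList) name.toList

-- matched = set(); for path: for pattern: if fnmatch: add; break   — inner loop-with-break = List.any
def match_globs (paths : List String) (globs : List String) : List String :=
  let matched : PySem.Set String :=
    paths.foldl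
      (fun acc path =>
        if globs.any (fun pattern => pvFnmatch path pattern) then PySem.Set.add acc path
        else acc)
      PySem.Set.empty
  PySem.List.sorted matched (fun x => x) false

-- ===== PORT B =====
inductive BTok
  | lit : Char → BTok
  | any : BTok
  | star : BTok
  | cls : Bool → List (Char × Char) → BTok
deriving DecidableEq, Repr

-- the class-body scanner: x '-' y is a range when y is not the closing position
def bScan : List Char → List (Char × Char)
  | [] => []
  | x :: d :: y :: rest' =>
    if d = '-' then (x, y) :: bScan rest' else (x, x) :: bScan (d :: y :: rest')
  | x :: rest => (x, x) :: bScan rest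

def bParse (fuel : Nat) (pat : List Char) : List BTok :=
  match fuel, pat with
  | 0, _ => []
  | _, [] => []
  | fuel + 1, c :: rest =>
    if c = '*' then BTok.star :: bParse fuel rest
    else if c = '?' then BTok.any :: bParse fuel rest
    else if c = '[' then
      let s1 := if rest.head? = some '!' then 1 else 0
      let s2 := if (rest.drop s1).head? = some ']' then 1 else 0
      match (rest.drop (s1 + s2)).findIdx? (fun x => x == ']') with
      | none => BTok.lit '[' :: bParse fuel rest
      | some m =>
        let stuff := rest.take (s1 + s2 + m)
        let neg := rest.head? = some '!'
        let body := if neg then stuff.drop 1 else stuff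
        BTok.cls neg (bScan body) :: bParse fuel (rest.drop (s1 + s2 + m + 1))
    else BTok.lit c :: bParse fuel rest

def bTokConsume : BTok → Char → Bool
  | BTok.lit c, x => x == c
  | BTok.any, _ => true
  | BTok.star, _ => true
  | BTok.cls neg rs, x =>
    (rs.any (fun p => decide (p.1 ≤ x) && decide (x ≤ p.2))) != neg

-- base dp row (empty suffix of s): dp[j] = "toks[j:] is all stars", built right-to-left
def bBaseRow : List BTok → List Bool
  | [] => [true]
  | t :: ts =>
    let r := bBaseRow ts
    (decide (t = BTok.star) && r.headD false) :: r

-- one dp row for character c from the previous row dp (j descending = from the right)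
def bRow : List BTok → Char → List Bool → List Bool
  | [], _, _ => [false]
  | t :: ts, c, dp =>
    let r := bRow ts c dp.tail
    (if t = BTok.star then r.headD false || dp.headD false
     else bTokConsume t c && dp.tail.headD false) :: r

-- for i in range(len(s)-1, -1, -1): dp = new row   — the descending loop is a right fold
def bMatch (toks : List BTok) (s : List Char) : Bool :=
  (s.foldr (fun c dp => bRow toks c dp) (bBaseRow toks)).headD false

def match_globs_alt (paths : List String) (globs : List String) : List String :=
  let matched : PySem.Set String :=
    globs.foldl
      (fun acc pattern =>
        let toks := bParse (pattern.toList.length + 1) pattern.toList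
        PySem.Set.update acc (paths.filter (fun p => bMatch toks p.toList)))
      PySem.Set.empty
  PySem.List.sorted matched (fun x => x) false

-- ===== PRECONDITION & SPEC =====
-- Pre_ excludes globs whose bracket classes contain a reversed range such as '[b-a!]':
-- there fnmatch's internal chunk-merging gives the class an accidental meaning (it can
-- even turn it into match-anything), while B gives an empty range its plain
-- match-nothing meaning; this unspecified corner is the only input A accepts that Pre_ removes.
def pvBodyOk : List Char → Bool
  | [] => true
  | x :: d :: y :: rest' =>
    if d = '-' then decide (x ≤ y) && pvBodyOk rest' else pvBodyOk (d :: y :: rest')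
  | _ :: rest => pvBodyOk rest

def pvGlobOk (fuel : Nat) (pat : List Char) : Bool :=
  match fuel, pat with
  | 0, _ => true
  | _, [] => true
  | fuel + 1, c :: rest =>
    if c = '[' then
      let s1 := if rest.head? = some '!' then 1 else 0
      let s2 := if (rest.drop s1).head? = some ']' then 1 else 0
      match (rest.drop (s1 + s2)).findIdx? (fun x => x == ']') with
      | none => pvGlobOk fuel rest
      | some m =>
        let stuff := rest.take (s1 + s2 + m)
        pvBodyOk (if rest.head? = some '!' then stuff.drop 1 else stuff) &&
          pvGlobOk fuel (rest.drop (s1 + s2 + m + 1))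
    else pvGlobOk fuel rest

def Pre_match_globs (paths : List String) (globs : List String) : Prop :=
  (globs.all (fun g => pvGlobOk (g.toList.length + 1) g.toList)) = true
instance (paths : List String) (globs : List String) : Decidable (Pre_match_globs paths globs) := by
  unfold Pre_match_globs; infer_instance

def pvWitness_match_globs : List String × List String :=
  (["a.txt", "b.md", "c.txt"], ["*.txt", "b?md"])

def Spec_match_globs (paths : List String) (globs : List String) (out : List String) : Prop :=
  out = match_globs_alt paths globs
instance (paths : List String) (globs : List String) (out : List String) :
    Decidable (Spec_match_globs paths globs out) := by
  unfold Spec_match_globs; infer_instance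

-- ===== CLAIM (what is proved, stated in full; the proofs are below) =====
def Claim_equal_match_globs : Prop :=
  ∀ (paths : List String) (globs : List String), Dom_match_globs paths globs →
    Pre_match_globs paths globs → Spec_match_globs paths globs (match_globs paths globs)

-- ===== LEMMAS AND PROOFS =====

-- recursive backtracking spec for B-tokens; the dp rows are proved to tabulate it
def bSpec : List BTok → List Char → Bool
  | [], s => s.isEmpty
  | t :: ts, s =>
    if t = BTok.star then
      bSpec ts s ||
        (match s with
         | [] => false
         | _ :: s' => bSpec (t :: ts) s')
    else
      match s with
      | [] => false
      | c :: s' => bTokConsume t c && bSpec ts s'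
termination_by ts s => (s.length, ts.length)

def bTails : List BTok → List Char → List Bool
  | [], s => [bSpec [] s]
  | t :: ts, s => bSpec (t :: ts) s :: bTails ts s

theorem bTails_headD (ts : List BTok) (s : List Char) :
    (bTails ts s).headD false = bSpec ts s := by
  cases ts <;> simp [bTails]

theorem bBaseRow_eq_bTails (ts : List BTok) : bBaseRow ts = bTails ts [] := by
  induction ts with
  | nil => simp [bBaseRow, bTails, bSpec]
  | cons t ts ih =>
    simp only [bBaseRow, bTails, ih, bTails_headD]
    by_cases h : t = BTok.star
    · simp [bSpec, h]
    · simp [bSpec, h]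

theorem bSpec_star_cons (ts : List BTok) (c : Char) (s : List Char) :
    bSpec (BTok.star :: ts) (c :: s) = (bSpec ts (c :: s) || bSpec (BTok.star :: ts) s) := by
  simp [bSpec]

theorem bSpec_star_nil (ts : List BTok) :
    bSpec (BTok.star :: ts) [] = bSpec ts [] := by
  simp [bSpec]

theorem bSpec_nonstar_cons (t : BTok) (ts : List BTok) (c : Char) (s : List Char)
    (h : ¬ t = BTok.star) :
    bSpec (t :: ts) (c :: s) = (bTokConsume t c && bSpec ts s) := by
  simp [bSpec, h]

theorem bSpec_nonstar_nil (t : BTok) (ts : List BTok) (h : ¬ t = BTok.star) :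
    bSpec (t :: ts) [] = false := by
  simp [bSpec, h]

theorem bRow_eq_bTails (ts : List BTok) (c : Char) (s : List Char) :
    bRow ts c (bTails ts s) = bTails ts (c :: s) := by
  induction ts with
  | nil => simp [bRow, bTails, bSpec]
  | cons t ts ih =>
    simp only [bRow, bTails, List.tail_cons, ih, bTails_headD]
    by_cases h : t = BTok.star
    · subst h
      rw [bSpec_star_cons]
      simp
    · rw [bSpec_nonstar_cons _ _ _ _ h]
      simp [h]

theorem bMatch_eq_bSpec (toks : List BTok) (s : List Char) :
    bMatch toks s = bSpec toks s := by
  unfold bMatch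
  have h : s.foldr (fun c dp => bRow toks c dp) (bBaseRow toks) = bTails toks s := by
    induction s with
    | nil => simpa using bBaseRow_eq_bTails toks
    | cons c s ih => simp [List.foldr, ih, bRow_eq_bTails]
  rw [h, bTails_headD]

theorem pvMatchA_star_cons (ts : List PvTok) (c : Char) (s : List Char) :
    pvMatchA (PvTok.star :: ts) (c :: s) =
      (pvMatchA ts (c :: s) || pvMatchA (PvTok.star :: ts) s) := by
  simp [pvMatchA]

theorem pvMatchA_star_nil (ts : List PvTok) :
    pvMatchA (PvTok.star :: ts) [] = pvMatchA ts [] := by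
  simp [pvMatchA]

theorem pvMatchA_nonstar_cons (t : PvTok) (ts : List PvTok) (c : Char) (s : List Char)
    (h : ¬ t = PvTok.star) :
    pvMatchA (t :: ts) (c :: s) = (pvTokConsume t c && pvMatchA ts s) := by
  simp [pvMatchA, h]

theorem pvMatchA_nonstar_nil (t : PvTok) (ts : List PvTok) (h : ¬ t = PvTok.star) :
    pvMatchA (t :: ts) [] = false := by
  simp [pvMatchA, h]

-- a pair of tokens with the same star-ness and the same one-character behaviour
def TokRel (a : PvTok) (b : BTok) : Prop :=
  (a = PvTok.star ↔ b = BTok.star) ∧ ∀ c, pvTokConsume a c = bTokConsume b c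

theorem pvMatchA_eq_bSpec : ∀ (s : List Char) (ta : List PvTok) (tb : List BTok),
    List.Forall₂ TokRel ta tb → pvMatchA ta s = bSpec tb s := by
  intro s
  induction s with
  | nil =>
    intro ta tb h
    induction h with
    | nil => simp [pvMatchA, bSpec]
    | @cons a b ta' tb' hab htl ih =>
      obtain ⟨hstar, _⟩ := hab
      by_cases ha : a = PvTok.star
      · have hb : b = BTok.star := hstar.mp ha
        subst ha; subst hb
        rw [pvMatchA_star_nil, bSpec_star_nil, ih]
      · have hb : ¬ b = BTok.star := fun h' => ha (hstar.mpr h')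
        rw [pvMatchA_nonstar_nil _ _ ha, bSpec_nonstar_nil _ _ hb]
  | cons c s' ihs =>
    intro ta tb h
    induction h with
    | nil => simp [pvMatchA, bSpec]
    | @cons a b ta' tb' hab htl ih =>
      obtain ⟨hstar, hcons⟩ := hab
      by_cases ha : a = PvTok.star
      · have hb : b = BTok.star := hstar.mp ha
        have h2 : pvMatchA (a :: ta') s' = bSpec (b :: tb') s' :=
          ihs (a :: ta') (b :: tb') (List.Forall₂.cons ⟨hstar, hcons⟩ htl)
        subst ha; subst hb
        rw [pvMatchA_star_cons, bSpec_star_cons, ih, h2]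
      · have hb : ¬ b = BTok.star := fun h' => ha (hstar.mpr h')
        have h2 : pvMatchA ta' s' = bSpec tb' s' := ihs ta' tb' htl
        rw [pvMatchA_nonstar_cons _ _ _ _ ha, bSpec_nonstar_cons _ _ _ _ hb, hcons c, h2]

-- scanner-style chunk builder: the shape pvChunks produces, built left-to-right
def chunksB : List Char → List Char → List (List Char)
  | acc, [] => [acc]
  | acc, x :: d :: y :: rest' =>
    if d = '-' then (acc ++ [x]) :: chunksB [y] rest'
    else chunksB (acc ++ [x]) (d :: y :: rest')
  | acc, x :: rest => chunksB (acc ++ [x]) rest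

theorem chunksB_head : ∀ (acc u : List Char),
    ∃ n r, chunksB acc u = (acc ++ u.take n) :: r ∧ (u ≠ [] → 1 ≤ n) := by
  intro acc u
  induction acc, u using chunksB.induct with
  | case1 acc => exact ⟨0, [], by simp [chunksB], fun h => absurd rfl h⟩
  | case2 acc x y rest' _ =>
    exact ⟨1, chunksB [y] rest', by simp [chunksB], fun _ => le_refl 1⟩
  | case3 acc x d y rest' hd ih =>
    obtain ⟨n, r, h1, _⟩ := ih
    exact ⟨n + 1, r, by simp [chunksB, hd, h1], fun _ => by omega⟩
  | case4 acc x rest h ih =>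
    obtain ⟨n, r, h1, _⟩ := ih
    refine ⟨n + 1, r, ?_, fun _ => by omega⟩
    rcases rest with _ | ⟨a, rest2⟩
    · simp [chunksB] at h1 ⊢
      exact h1
    · rcases rest2 with _ | ⟨b, rest3⟩
      · simp [chunksB] at h1 ⊢
        exact h1
      · exact absurd rfl (h a b rest3)

theorem chunksB_acc : ∀ (acc u : List Char) (a1 : List Char) (b : List Char) (r : List (List Char)),
    chunksB acc u = b :: r → chunksB (a1 ++ acc) u = (a1 ++ b) :: r := by
  intro acc u
  induction acc, u using chunksB.induct with
  | case1 acc =>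
    intro a1 b r h
    simp only [chunksB] at h ⊢
    injection h with h1 h2
    subst h1; subst h2
    rfl
  | case2 acc x y rest' _ =>
    intro a1 b r h
    simp only [chunksB, if_pos rfl] at h ⊢
    injection h with h1 h2
    subst h1; subst h2
    simp
  | case3 acc x d y rest' hd ih =>
    intro a1 b r h
    simp only [chunksB, if_neg hd] at h ⊢
    rw [List.append_assoc]
    exact ih a1 b r h
  | case4 acc x rest hsh ih =>
    intro a1 b r h
    rcases rest with _ | ⟨a, rest2⟩
    · simp only [chunksB] at h ⊢
      rw [List.append_assoc]
      exact ih a1 b r h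
    · rcases rest2 with _ | ⟨c, rest3⟩
      · simp only [chunksB] at h ⊢
        injection h with h1 h2
        subst h1; subst h2
        simp
      · exact absurd rfl (hsh a c rest3)

theorem chunksB_nohyp : ∀ (acc u : List Char), '-' ∉ u.dropLast.drop 1 → chunksB acc u = [acc ++ u] := by
  intro acc u
  induction acc, u using chunksB.induct with
  | case1 acc => intro _; simp [chunksB]
  | case2 acc x y rest' _ =>
    intro hm
    exfalso
    apply hm
    rw [List.dropLast_cons₂, List.dropLast_cons₂]
    simp
  | case3 acc x d y rest' hd ih =>
    intro hm
    have hm' : '-' ∉ (d :: y :: rest').dropLast.drop 1 := by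
      intro hmem
      apply hm
      rw [List.dropLast_cons₂, List.dropLast_cons₂]
      rw [List.dropLast_cons₂] at hmem
      simp at hmem ⊢
      tauto
    simp only [chunksB, if_neg hd]
    rw [ih hm']
    simp
  | case4 acc x rest hsh ih =>
    intro hm
    rcases rest with _ | ⟨a, rest2⟩
    · simp [chunksB]
    · rcases rest2 with _ | ⟨b, rest3⟩
      · simp [chunksB]
      · exact absurd rfl (hsh a b rest3)

theorem chunksB_split : ∀ (v : List Char) (acc : List Char) (y : Char) (u' : List Char),
    v ≠ [] → '-' ∉ v.drop 1 →
    chunksB acc (v ++ '-' :: y :: u') = (acc ++ v) :: chunksB [y] u' := by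
  intro v
  induction v with
  | nil => intro acc y u' h _; exact absurd rfl h
  | cons x v' ih =>
    intro acc y u' _ hm
    rcases v' with _ | ⟨w, v''⟩
    · show chunksB acc (x :: '-' :: y :: u') = (acc ++ [x]) :: chunksB [y] u'
      simp [chunksB]
    · have hw : ¬ w = '-' := by intro h; apply hm; simp [h]
      obtain ⟨b, l, hbl⟩ : ∃ b l, v'' ++ '-' :: y :: u' = b :: l := by
        rcases v'' with _ | ⟨z, v3⟩
        · exact ⟨'-', y :: u', rfl⟩
        · exact ⟨z, v3 ++ '-' :: y :: u', rfl⟩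
      have e1 : (x :: w :: v'') ++ '-' :: y :: u' = x :: w :: b :: l := by
        rw [List.cons_append, List.cons_append, hbl]
      have e2 : (w :: v'') ++ '-' :: y :: u' = w :: b :: l := by
        rw [List.cons_append, hbl]
      have step : chunksB acc ((x :: w :: v'') ++ '-' :: y :: u') =
          chunksB (acc ++ [x]) ((w :: v'') ++ '-' :: y :: u') := by
        rw [e1, e2]
        simp [chunksB, hw]
      rw [step, ih (acc ++ [x]) y u' (by simp) (by intro h; apply hm; simp at h ⊢; tauto)]
      simp

theorem pvBodyOk_range (x y : Char) (rest' : List Char) :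
    pvBodyOk (x :: '-' :: y :: rest') = (decide (x ≤ y) && pvBodyOk rest') := by
  simp [pvBodyOk]

theorem pvBodyOk_nonrange (x d y : Char) (rest' : List Char) (hd : ¬ d = '-') :
    pvBodyOk (x :: d :: y :: rest') = pvBodyOk (d :: y :: rest') := by
  simp [pvBodyOk, hd]

theorem merge_noop : ∀ (acc u : List Char), pvBodyOk u = true →
    pvMerge (chunksB acc u) = chunksB acc u := by
  intro acc u
  induction acc, u using chunksB.induct with
  | case1 acc => intro _; rfl
  | case2 acc x y rest' ih =>
    intro hok
    rw [pvBodyOk_range] at hok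
    simp only [Bool.and_eq_true, decide_eq_true_eq] at hok
    obtain ⟨n, r, hh, _⟩ := chunksB_head [y] rest'
    simp only [chunksB, if_pos rfl, if_true]
    have hrec : pvMerge (chunksB [y] rest') = chunksB [y] rest' := ih hok.2
    rw [hh] at hrec ⊢
    have h1 : (([y] ++ List.take n rest').headD ' ') = y := by simp
    have h2 : ((acc ++ [x]).getLastD ' ') = x := by simp
    rw [pvMerge.eq_def]
    simp only [hrec, h1, h2]
    rw [if_neg (not_lt.mpr hok.1)]
  | case3 acc x d y rest' hd ih =>
    intro hok
    rw [pvBodyOk_nonrange _ _ _ _ hd] at hok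
    simp only [chunksB, if_neg hd]
    exact ih hok
  | case4 acc x rest hsh ih =>
    intro hok
    rcases rest with _ | ⟨a, rest2⟩
    · simp [chunksB, pvMerge]
    · rcases rest2 with _ | ⟨b, rest3⟩
      · simp only [chunksB]
        exact ih (by simpa [pvBodyOk] using hok)
      · exact absurd rfl (hsh a b rest3)

def denA (items : List PvItem) (x : Char) : Bool :=
  items.any (fun it =>
    match it with
    | PvItem.single c => x == c
    | PvItem.range a b => decide (a ≤ x) && decide (x ≤ b))

def denB (rs : List (Char × Char)) (x : Char) : Bool :=
  rs.any (fun p => decide (p.1 ≤ x) && decide (x ≤ p.2))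

theorem consume_cls (neg : Bool) (items : List PvItem) (x : Char) :
    pvTokConsume (PvTok.cls neg items) x = (denA items x != neg) := rfl

theorem consume_bcls (neg : Bool) (rs : List (Char × Char)) (x : Char) :
    bTokConsume (BTok.cls neg rs) x = (denB rs x != neg) := rfl

theorem single_range (c x : Char) : (decide (c ≤ x) && decide (x ≤ c)) = (x == c) := by
  rw [Bool.eq_iff_iff]
  simp only [Bool.and_eq_true, decide_eq_true_eq, beq_iff_eq]
  constructor
  · rintro ⟨h1, h2⟩; exact le_antisymm h2 h1
  · rintro rfl; exact ⟨le_refl _, le_refl _⟩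

theorem denA_singles (l : List Char) (z : Char) :
    denA (l.map PvItem.single) z = l.any (fun c => z == c) := by
  induction l with
  | nil => rfl
  | cons c l ih => simp [denA, List.any_cons] at ih ⊢; rw [ih]

theorem denA_append (l1 l2 : List PvItem) (z : Char) :
    denA (l1 ++ l2) z = (denA l1 z || denA l2 z) := by
  simp [denA]

theorem pvItemsOf_cons_cons (c d : List Char) (r : List (List Char)) (a b : Char)
    (hc : c.getLast? = some a) (hd : d.head? = some b) :
    pvItemsOf (c :: d :: r) =
      c.map PvItem.single ++ [PvItem.range a b] ++ pvItemsOf (d :: r) := by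
  simp [pvItemsOf, hc, hd]

theorem den_main : ∀ (acc u : List Char), pvBodyOk u = true → ∀ z : Char,
    denA (pvItemsOf (chunksB acc u)) z =
      (acc.any (fun c => z == c) || denB (bScan u) z) := by
  intro acc u
  induction acc, u using chunksB.induct with
  | case1 acc =>
    intro _ z
    simp [chunksB, pvItemsOf, denA_singles, bScan, denB]
  | case2 acc x y rest' ih =>
    intro hok z
    rw [pvBodyOk_range] at hok
    simp only [Bool.and_eq_true, decide_eq_true_eq] at hok
    obtain ⟨n, r, hh, _⟩ := chunksB_head [y] rest'
    have hlast : (acc ++ [x]).getLast? = some x := by simp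
    have hhead : (([y] ++ List.take n rest')).head? = some y := by simp
    have hscan : bScan (x :: '-' :: y :: rest') = (x, y) :: bScan rest' := by simp [bScan]
    simp only [chunksB, if_pos rfl, if_true, hscan, hh]
    rw [pvItemsOf_cons_cons _ _ _ _ _ hlast hhead, ← hh]
    rw [denA_append, denA_append]
    have hih := ih hok.2 z
    rw [hih]
    have hsing : denA ((acc ++ [x]).map PvItem.single) z =
        (acc.any (fun c => z == c) || (z == x)) := by
      rw [denA_singles]; simp
    rw [hsing]
    have hrange : denA [PvItem.range x y] z = (decide (x ≤ z) && decide (z ≤ y)) := by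
      simp [denA]
    rw [hrange]
    rw [Bool.eq_iff_iff]
    simp only [Bool.or_eq_true, Bool.and_eq_true, decide_eq_true_eq, beq_iff_eq,
      List.any_eq_true, List.any_cons, List.any_nil, denB]
    have hx' : z = x → (x ≤ z ∧ z ≤ y) := by rintro rfl; exact ⟨le_refl _, hok.1⟩
    have hy' : z = y → (x ≤ z ∧ z ≤ y) := by rintro rfl; exact ⟨hok.1, le_refl _⟩
    constructor
    · rintro (((h | rfl) | h) | (rfl | hf) | h)
      · exact Or.inl h
      · exact Or.inr (Or.inl (hx' rfl))
      · exact Or.inr (Or.inl h)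
      · exact Or.inr (Or.inl (hy' rfl))
      · exact (Bool.false_ne_true hf).elim
      · exact Or.inr (Or.inr h)
    · rintro (h | h | h)
      · exact Or.inl (Or.inl (Or.inl h))
      · exact Or.inl (Or.inr h)
      · exact Or.inr (Or.inr h)
  | case3 acc x d y rest' hd ih =>
    intro hok z
    rw [pvBodyOk_nonrange _ _ _ _ hd] at hok
    have hscan : bScan (x :: d :: y :: rest') = (x, x) :: bScan (d :: y :: rest') := by
      simp [bScan, hd]
    simp only [chunksB, if_neg hd, hscan]
    rw [ih hok z]
    simp only [denB, List.any_cons]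
    rw [single_range]
    simp [Bool.or_assoc]
  | case4 acc x rest hsh ih =>
    intro hok z
    rcases rest with _ | ⟨a, rest2⟩
    · rw [show chunksB acc [x] = [acc ++ [x]] from rfl,
        show pvItemsOf [acc ++ [x]] = (acc ++ [x]).map PvItem.single from rfl, denA_singles,
        show bScan [x] = [(x, x)] from rfl]
      simp only [denB, List.any_cons, List.any_nil]
      rw [single_range]
      simp
    · rcases rest2 with _ | ⟨b, rest3⟩
      · rw [show chunksB acc [x, a] = [acc ++ [x] ++ [a]] from rfl,
          show pvItemsOf [acc ++ [x] ++ [a]] = (acc ++ [x] ++ [a]).map PvItem.single from rfl,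
          denA_singles, show bScan [x, a] = [(x, x), (a, a)] from rfl]
        simp only [denB, List.any_cons, List.any_nil]
        rw [single_range, single_range]
        simp [Bool.or_assoc]
      · exact absurd rfl (hsh a b rest3)


theorem pvChunks_succ (f : Nat) (s : List Char) (skip : Nat) :
    pvChunks (f + 1) s skip =
      match ((s.drop skip).findIdx? (fun c => c == '-')).map (· + skip) with
      | none => [s]
      | some k =>
        match pvChunks f (s.drop (k + 1)) 2 with
        | [[]] => [s.take k ++ ['-']]
        | rest => s.take k :: rest := rfl

theorem pvChunks_none (f : Nat) (s : List Char) (skip : Nat)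
    (h : (s.drop skip).findIdx? (fun c => c == '-') = none) :
    pvChunks (f + 1) s skip = [s] := by
  rw [pvChunks_succ, h]
  rfl

theorem pvChunks_some (f : Nat) (s : List Char) (skip m : Nat)
    (h : (s.drop skip).findIdx? (fun c => c == '-') = some m) :
    pvChunks (f + 1) s skip =
      (match pvChunks f (s.drop (m + skip + 1)) 2 with
       | [[]] => [s.take (m + skip) ++ ['-']]
       | rest => s.take (m + skip) :: rest) := by
  rw [pvChunks_succ, h]
  rfl

theorem pvChunks_nil2 (f : Nat) (hf : 1 ≤ f) : pvChunks f [] 2 = [[]] := by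
  cases f with
  | zero => omega
  | succ f' => rw [pvChunks_none f' [] 2 (by simp)]

theorem mem_drop_one_of_mem_dropLast_drop_one (l : List Char) (h : '-' ∈ l.dropLast.drop 1) :
    '-' ∈ l.drop 1 := by
  have hs : List.Sublist (l.dropLast.drop 1) (l.drop 1) := (List.dropLast_sublist l).drop 1
  exact hs.subset h

theorem pvChunks_eq_chunksB2 : ∀ (fuel : Nat) (t0 : Char) (t' : List Char), t'.length < fuel →
    pvChunks fuel (t0 :: t') 2 = chunksB [t0] t' := by
  intro fuel
  induction fuel with
  | zero => intro t0 t' h; exact absurd h (Nat.not_lt_zero _)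
  | succ f ih =>
    intro t0 t' hlen
    have hdrop : (t0 :: t').drop 2 = t'.drop 1 := rfl
    cases hf : (t'.drop 1).findIdx? (fun c => c == '-') with
    | none =>
      rw [pvChunks_none f (t0 :: t') 2 (by rw [hdrop]; exact hf)]
      have hnm : '-' ∉ t'.drop 1 := by
        rw [List.findIdx?_eq_none_iff] at hf
        intro hm
        simpa using hf _ hm
      rw [chunksB_nohyp [t0] t' (fun hm => hnm (mem_drop_one_of_mem_dropLast_drop_one t' hm))]
      simp
    | some m =>
      rcases t' with _ | ⟨c1, t''⟩
      · simp at hf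
      have hf'' : t''.findIdx? (fun c => c == '-') = some m := by simpa using hf
      rw [List.findIdx?_eq_some_iff_getElem] at hf''
      obtain ⟨hmlt, hpm, hmin⟩ := hf''
      have hgm : t''[m] = '-' := by simpa using hpm
      have hdec : t'' = t''.take m ++ '-' :: t''.drop (m + 1) := by
        conv_lhs => rw [← List.take_append_drop m t'']
        rw [List.drop_eq_getElem_cons hmlt, hgm]
      have hvnm : '-' ∉ (c1 :: t''.take m).drop 1 := by
        simp only [List.drop_succ_cons, List.drop_zero]
        intro hm2
        rw [List.mem_take_iff_getElem] at hm2
        obtain ⟨j, hj, hj2⟩ := hm2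
        have hjm : j < m := by omega
        have := hmin j hjm
        simp [hj2] at this
      have hlt : ((t0 :: c1 :: t'').drop 2).findIdx? (fun c => c == '-') = some m := by
        simpa using hf
      rw [pvChunks_some f (t0 :: c1 :: t'') 2 m hlt]
      have hteq : m + 2 + 1 = m + 3 := rfl
      have hdropk : (t0 :: c1 :: t'').drop (m + 2 + 1) = t''.drop (m + 1) := by
        rw [hteq]
        show (t0 :: c1 :: t'').drop (m + 1 + 1 + 1) = t''.drop (m + 1)
        rw [List.drop_succ_cons, List.drop_succ_cons]
      have htake : (t0 :: c1 :: t'').take (m + 2) = t0 :: c1 :: t''.take m := by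
        rw [show m + 2 = (m + 1) + 1 from rfl, List.take_succ_cons, List.take_succ_cons]
      cases hw : t''.drop (m + 1) with
      | nil =>
        have hfge : 1 ≤ f := by
          simp at hlen
          omega
        rw [hdropk, hw, pvChunks_nil2 f hfge, htake]
        have hbody : c1 :: t'' = (c1 :: t''.take m) ++ ['-'] := by
          conv_lhs => rw [hdec]
          rw [hw]
          simp
        rw [hbody, chunksB_nohyp [t0] _ ?side]
        · simp
        case side =>
          rw [List.dropLast_concat]
          exact hvnm
      | cons y u' =>
        have hulen : u'.length < f := by
          have h1 : t''.length = m + 1 + (t''.drop (m + 1)).length := by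
            rw [List.length_drop]; omega
          rw [hw] at h1
          simp at h1 hlen
          omega
        rw [hdropk, hw, ih y u' hulen, htake]
        obtain ⟨n2, r2, hh2, _⟩ := chunksB_head [y] u'
        have hbody : c1 :: t'' = (c1 :: t''.take m) ++ '-' :: y :: u' := by
          conv_lhs => rw [hdec, hw]
          simp
        rw [hbody, chunksB_split (c1 :: t''.take m) [t0] y u' (by simp) hvnm]
        rw [hh2]
        simp

theorem pvChunks_eq_chunksB1 (fuel : Nat) (s : List Char) (hlen : s.length < fuel) :
    pvChunks fuel s 1 = chunksB [] s := by
  cases fuel with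
  | zero => exact absurd hlen (Nat.not_lt_zero _)
  | succ f =>
    rcases s with _ | ⟨c1, s''⟩
    · rw [pvChunks_none f [] 1 (by simp)]
      rfl
    cases hf : s''.findIdx? (fun c => c == '-') with
    | none =>
      rw [pvChunks_none f (c1 :: s'') 1 (by simpa using hf)]
      have hnm : '-' ∉ s'' := by
        rw [List.findIdx?_eq_none_iff] at hf
        intro hm
        simpa using hf _ hm
      rw [chunksB_nohyp [] (c1 :: s'') ?side]
      · simp
      case side =>
        intro hm
        have := mem_drop_one_of_mem_dropLast_drop_one (c1 :: s'') hm
        simp at this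
        exact hnm this
    | some m =>
      rw [List.findIdx?_eq_some_iff_getElem] at hf
      obtain ⟨hmlt, hpm, hmin⟩ := hf
      have hgm : s''[m] = '-' := by simpa using hpm
      have hdec : s'' = s''.take m ++ '-' :: s''.drop (m + 1) := by
        conv_lhs => rw [← List.take_append_drop m s'']
        rw [List.drop_eq_getElem_cons hmlt, hgm]
      have hvnm : '-' ∉ (c1 :: s''.take m).drop 1 := by
        simp only [List.drop_succ_cons, List.drop_zero]
        intro hm2
        rw [List.mem_take_iff_getElem] at hm2
        obtain ⟨j, hj, hj2⟩ := hm2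
        have hjm : j < m := by omega
        have := hmin j hjm
        simp [hj2] at this
      have hlt : ((c1 :: s'').drop 1).findIdx? (fun c => c == '-') = some m := by
        simpa using (List.findIdx?_eq_some_iff_getElem.mpr ⟨hmlt, hpm, hmin⟩)
      rw [pvChunks_some f (c1 :: s'') 1 m hlt]
      have hdropk : (c1 :: s'').drop (m + 1 + 1) = s''.drop (m + 1) := by
        rw [List.drop_succ_cons]
      have htake : (c1 :: s'').take (m + 1) = c1 :: s''.take m := by
        rw [List.take_succ_cons]
      cases hw : s''.drop (m + 1) with
      | nil =>
        have hfge : 1 ≤ f := by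
          simp at hlen
          omega
        rw [hdropk, hw, pvChunks_nil2 f hfge, htake]
        have hbody : c1 :: s'' = (c1 :: s''.take m) ++ ['-'] := by
          conv_lhs => rw [hdec, hw]
          simp
        rw [hbody, chunksB_nohyp [] _ ?side]
        · simp
        case side =>
          rw [List.dropLast_concat]
          exact hvnm
      | cons y u' =>
        rw [hdropk, hw, htake]
        have hulen : u'.length < f := by
          have h1 : s''.length = m + 1 + (s''.drop (m + 1)).length := by
            rw [List.length_drop]; omega
          rw [hw] at h1
          simp at h1 hlen
          omega
        rw [pvChunks_eq_chunksB2 f y u' hulen]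
        obtain ⟨n2, r2, hh2, _⟩ := chunksB_head [y] u'
        have hbody : c1 :: s'' = (c1 :: s''.take m) ++ '-' :: y :: u' := by
          conv_lhs => rw [hdec, hw]
          simp
        rw [hbody, chunksB_split (c1 :: s''.take m) [] y u' (by simp) hvnm]
        rw [hh2]
        simp


theorem bScan_no_hyphen : ∀ (b : List Char), '-' ∉ b → bScan b = b.map (fun c => (c, c)) := by
  intro b
  induction b using bScan.induct with
  | case1 => intro _; rfl
  | case2 x y rest' ih =>
    intro hm
    exact absurd (by simp : '-' ∈ (x :: '-' :: y :: rest')) hm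
  | case3 x d y rest' hd ih =>
    intro hm
    have : bScan (x :: d :: y :: rest') = (x, x) :: bScan (d :: y :: rest') := by
      simp [bScan, hd]
    rw [this, ih (fun hh => hm (List.mem_cons_of_mem _ hh))]
    rfl
  | case4 x rest hsh ih =>
    intro hm
    rcases rest with _ | ⟨a, rest2⟩
    · rfl
    · rcases rest2 with _ | ⟨b2, rest3⟩
      · have : bScan [x, a] = (x, x) :: bScan [a] := rfl
        rw [this, ih (fun hh => hm (List.mem_cons_of_mem _ hh))]
        rfl
      · exact absurd rfl (hsh a b2 rest3)

theorem denB_singles (l : List Char) (z : Char) :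
    denB (l.map (fun c => (c, c))) z = l.any (fun c => z == c) := by
  induction l with
  | nil => rfl
  | cons c l ih =>
    simp only [List.map_cons, denB, List.any_cons] at ih ⊢
    rw [single_range, ih]

theorem cls_rel (stuff : List Char) (hb : Option Char) (hhb : hb = stuff.head?)
    (hok : pvBodyOk (if hb = some '!' then stuff.drop 1 else stuff) = true) :
    TokRel (pvClassTok stuff)
      (BTok.cls (hb = some '!') (bScan (if hb = some '!' then stuff.drop 1 else stuff))) := by
  subst hhb
  by_cases hc : stuff.contains '-'
  · -- a class with ranges: the chunk machinery, with merging a no-op under pvBodyOk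
    by_cases hneg : stuff.head? = some '!'
    · rcases stuff with _ | ⟨c0, t'⟩
      · simp at hneg
      have hc0 : c0 = '!' := by simpa using hneg
      subst hc0
      have hbody : (if (('!' :: t').head? = some '!') then ('!' :: t').drop 1 else ('!' :: t')) = t' := by simp
      rw [hbody] at hok ⊢
      have ht'ne : t' ≠ [] := by
        intro h
        subst h
        simp at hc
      obtain ⟨n0, r0, hh0, hpos0⟩ := chunksB_head [] t'
      simp only [List.nil_append] at hh0
      have hacc : chunksB ['!'] t' = ('!' :: t'.take n0) :: r0 := by
        have h := chunksB_acc [] t' ['!'] (t'.take n0) r0 (by simpa using hh0)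
        simpa using h
      have hn0 : 1 ≤ n0 := hpos0 ht'ne
      have htk : t'.take n0 ≠ [] := by
        rcases t' with _ | ⟨a, t''⟩
        · exact absurd rfl ht'ne
        · rcases n0 with _ | n0'
          · omega
          · simp [List.take_succ_cons]
      simp only [pvClassTok, if_pos hc, if_pos hneg]
      rw [pvChunks_eq_chunksB2 (('!' :: t').length + 1) '!' t' (by simp)]
      rw [merge_noop ['!'] t' hok, hacc]
      rw [show ((('!' :: t'.take n0) :: r0).flatten) = '!' :: (t'.take n0 ++ r0.flatten) by simp]
      rw [if_neg (by simp), if_neg ?h2]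
      case h2 =>
        intro hcon
        injection hcon with _ h2'
        exact htk (List.append_eq_nil_iff.mp h2').1
      refine ⟨by simp, fun z => ?_⟩
      rw [consume_cls, consume_bcls]
      congr 1
      rw [if_pos (by simp)]
      rw [show (('!' :: t'.take n0) :: r0).modifyHead (List.drop 1) = (t'.take n0) :: r0 by
        simp [List.modifyHead_cons]]
      rw [← hh0, den_main [] t' hok z]
      simp
    · have hsne : stuff ≠ [] := by
        intro h
        subst h
        simp at hc
      rcases stuff with _ | ⟨c0, st⟩
      · simp at hc
      have hbody : (if ((c0 :: st).head? = some '!') then (c0 :: st).drop 1 else (c0 :: st)) = c0 :: st := by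
        rw [if_neg hneg]
      rw [hbody] at hok ⊢
      obtain ⟨n0, r0, hh0, hpos0⟩ := chunksB_head [] (c0 :: st)
      simp only [List.nil_append] at hh0
      have hn0 : 1 ≤ n0 := hpos0 (by simp)
      have htk : (c0 :: st).take n0 = c0 :: st.take (n0 - 1) := by
        rcases n0 with _ | n0'
        · omega
        · simp [List.take_succ_cons]
      simp only [pvClassTok, if_pos hc, if_neg hneg]
      rw [pvChunks_eq_chunksB1 ((c0 :: st).length + 1) (c0 :: st) (by simp)]
      rw [merge_noop [] (c0 :: st) hok, hh0, htk]
      rw [show ((c0 :: st.take (n0 - 1)) :: r0).flatten = c0 :: (st.take (n0 - 1) ++ r0.flatten) by simp]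
      have hc0ne : ¬ c0 = '!' := by
        intro h
        exact hneg (by simp [h])
      rw [if_neg (by simp), if_neg ?hq]
      case hq =>
        intro hcon
        injection hcon with h1 _
        exact hc0ne h1
      refine ⟨by simp, fun z => ?_⟩
      rw [consume_cls, consume_bcls]
      congr 1
      rw [if_neg ?hq2]
      case hq2 =>
        intro hcon
        exact hc0ne (by simpa using hcon)
      rw [← htk, ← hh0, den_main [] (c0 :: st) hok z]
      simp
  · -- no '-': the class is a plain set of characters
    have hnm : '-' ∉ stuff := by simpa using hc
    rcases stuff with _ | ⟨c0, st⟩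
    · refine ⟨by simp [pvClassTok], fun z => ?_⟩
      rw [show pvClassTok [] = PvTok.never from rfl]
      rfl
    by_cases hbang : (c0 :: st) = ['!']
    · rw [hbang]
      refine ⟨by simp [pvClassTok], fun z => ?_⟩
      rw [show pvClassTok ['!'] = PvTok.any from rfl]
      rfl
    · have hA : pvClassTok (c0 :: st) = PvTok.cls ((c0 :: st).head? = some '!')
          (pvItemsOf [if (c0 :: st).head? = some '!' then (c0 :: st).drop 1 else (c0 :: st)]) := by
        simp only [pvClassTok, if_neg hc]
        rw [show ([c0 :: st] : List (List Char)).flatten = c0 :: st by simp]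
        rw [if_neg (by simp), if_neg hbang]
        by_cases hn : (c0 :: st).head? = some '!'
        · rw [if_pos hn, if_pos hn]
          rfl
        · rw [if_neg hn, if_neg hn]
      rw [hA]
      refine ⟨by simp, fun z => ?_⟩
      rw [consume_cls, consume_bcls]
      congr 1
      by_cases hn : (c0 :: st).head? = some '!'
      · rw [if_pos hn]
        have hnm' : '-' ∉ (c0 :: st).drop 1 := by
          intro h
          exact hnm (List.mem_cons_of_mem _ (by simpa using h))
        rw [show pvItemsOf [(c0 :: st).drop 1] = ((c0 :: st).drop 1).map PvItem.single from rfl]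
        rw [denA_singles, bScan_no_hyphen _ hnm', denB_singles]
      · rw [if_neg hn]
        rw [show pvItemsOf [c0 :: st] = (c0 :: st).map PvItem.single from rfl]
        rw [denA_singles, bScan_no_hyphen _ hnm, denB_singles]

theorem parse_rel : ∀ (fuel : Nat) (pat : List Char), pvGlobOk fuel pat = true →
    List.Forall₂ TokRel (pvParse fuel pat) (bParse fuel pat) := by
  intro fuel
  induction fuel with
  | zero => intro pat _; exact List.Forall₂.nil
  | succ f ih =>
    intro pat hok
    rcases pat with _ | ⟨c, rest⟩
    · exact List.Forall₂.nil
    by_cases h1 : c = '*'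
    · subst h1
      have hok' : pvGlobOk f rest = true := by simpa [pvGlobOk] using hok
      simp only [pvParse, bParse, if_pos rfl]
      exact List.Forall₂.cons ⟨by simp, fun z => rfl⟩ (ih rest hok')
    by_cases h2 : c = '?'
    · subst h2
      have hok' : pvGlobOk f rest = true := by simpa [pvGlobOk] using hok
      simp only [pvParse, bParse, if_neg (by decide : ¬ '?' = '*'), if_pos rfl]
      exact List.Forall₂.cons ⟨by simp, fun z => rfl⟩ (ih rest hok')
    by_cases h3 : c = '['
    · subst h3
      simp only [pvParse, bParse, if_neg (by decide : ¬ '[' = '*'),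
        if_neg (by decide : ¬ '[' = '?'), if_pos rfl]
      simp only [pvGlobOk, if_pos rfl] at hok
      cases hfind : ((rest.drop ((if rest.head? = some '!' then 1 else 0) +
          (if (rest.drop (if rest.head? = some '!' then 1 else 0)).head? = some ']' then 1 else 0))).findIdx?
            (fun x => x == ']')) with
    | none =>
        rw [hfind] at hok
        exact List.Forall₂.cons ⟨by simp, fun z => rfl⟩ (ih rest hok)
    | some m =>
        rw [hfind] at hok
        simp only [if_true, Bool.and_eq_true] at hok
        rcases rest with _ | ⟨r0, rest'⟩
        · simp at hfind
        have hK : 1 ≤ (if (r0 :: rest').head? = some '!' then 1 else 0) +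
            (if ((r0 :: rest').drop (if (r0 :: rest').head? = some '!' then 1 else 0)).head? = some ']' then 1 else 0) + m := by
          by_cases hb1 : (r0 :: rest').head? = some '!'
          · rw [if_pos hb1]
            exact Nat.le_trans (Nat.le_add_right 1 _) (Nat.le_add_right _ m)
          · by_cases hb2 : ((r0 :: rest').drop (if (r0 :: rest').head? = some '!' then 1 else 0)).head? = some ']'
            · rw [if_pos hb2]
              exact Nat.le_trans (Nat.le_add_left 1 _) (Nat.le_add_right _ m)
            · rcases Nat.eq_zero_or_pos m with hm0 | hmpos
              · exfalso
                subst hm0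
                have hb2n : ¬ (List.drop 0 (r0 :: rest')).head? = some ']' := by
                  rw [if_neg hb1] at hb2
                  exact hb2
                have hb2' : ¬ r0 = ']' := by simpa using hb2n
                have hdr : ((r0 :: rest').drop ((if (r0 :: rest').head? = some '!' then 1 else 0) +
                    (if ((r0 :: rest').drop (if (r0 :: rest').head? = some '!' then 1 else 0)).head? = some ']' then 1 else 0))) = r0 :: rest' := by
                  rw [if_neg hb1, if_neg hb2n]
                  simp
                rw [hdr] at hfind
                rw [List.findIdx?_eq_some_iff_getElem] at hfind
                obtain ⟨hlt, hp, -⟩ := hfind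
                exact hb2' (by simpa using hp)
              · exact Nat.le_trans hmpos (Nat.le_add_left m _)
        have hstuffhead : (r0 :: rest').head? =
            (((r0 :: rest').take ((if (r0 :: rest').head? = some '!' then 1 else 0) +
              (if ((r0 :: rest').drop (if (r0 :: rest').head? = some '!' then 1 else 0)).head? = some ']' then 1 else 0) + m))).head? := by
          rcases hKe : ((if (r0 :: rest').head? = some '!' then 1 else 0) +
              (if ((r0 :: rest').drop (if (r0 :: rest').head? = some '!' then 1 else 0)).head? = some ']' then 1 else 0) + m) with _ | K'
          · rw [hKe] at hK
            exact absurd hK (by decide)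
          · simp [List.take_succ_cons]
        exact List.Forall₂.cons (cls_rel _ _ hstuffhead hok.1) (ih _ hok.2)
    · have hok' : pvGlobOk f rest = true := by simpa [pvGlobOk, h3] using hok
      simp only [pvParse, bParse, if_neg h1, if_neg h2, if_neg h3]
      exact List.Forall₂.cons ⟨by simp, fun z => rfl⟩ (ih rest hok')

theorem fnmatch_rel (name pat : String) (h : pvGlobOk (pat.toList.length + 1) pat.toList = true) :
    pvFnmatch name pat = bMatch (bParse (pat.toList.length + 1) pat.toList) name.toList := by
  unfold pvFnmatch
  rw [bMatch_eq_bSpec]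
  exact pvMatchA_eq_bSpec _ _ _ (parse_rel _ _ h)

theorem pvMemFoldA (paths globs : List String) (s : PySem.Set String) (y : String) :
    y ∈ paths.foldl
        (fun acc path =>
          if globs.any (fun pattern => pvFnmatch path pattern) then PySem.Set.add acc path
          else acc) s ↔
      y ∈ s ∨ (y ∈ paths ∧ ∃ g ∈ globs, pvFnmatch y g = true) := by
  induction paths generalizing s with
  | nil => simp
  | cons p t ih =>
    simp only [List.foldl_cons, List.mem_cons, ih]
    by_cases hp : globs.any (fun pattern => pvFnmatch p pattern) = true
    · simp only [hp, if_pos, PySem.Set.mem_add]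
      rw [List.any_eq_true] at hp
      constructor
      · rintro ((h | rfl) | ⟨hy, hg⟩)
        · exact Or.inl h
        · exact Or.inr ⟨Or.inl rfl, by simpa using hp⟩
        · exact Or.inr ⟨Or.inr hy, hg⟩
      · rintro (h | ⟨(rfl | hy), hg⟩)
        · exact Or.inl (Or.inl h)
        · exact Or.inl (Or.inr rfl)
        · exact Or.inr ⟨hy, hg⟩
    · simp only [hp, if_neg, Bool.false_eq_true, not_false_iff]
      constructor
      · rintro (h | ⟨hy, hg⟩)
        · exact Or.inl h
        · exact Or.inr ⟨Or.inr hy, hg⟩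
      · rintro (h | ⟨(rfl | hy), hg⟩)
        · exact Or.inl h
        · exact absurd (List.any_eq_true.2 (by simpa using hg)) hp
        · exact Or.inr ⟨hy, hg⟩

theorem pvNodupFoldA (paths globs : List String) (s : PySem.Set String) (hs : s.Nodup) :
    (paths.foldl
        (fun acc path =>
          if globs.any (fun pattern => pvFnmatch path pattern) then PySem.Set.add acc path
          else acc) s).Nodup := by
  induction paths generalizing s with
  | nil => simpa
  | cons p t ih =>
    simp only [List.foldl_cons]
    split
    · exact ih _ (PySem.Set.nodup_add _ _ hs)
    · exact ih _ hs

theorem pvMemFoldB (paths globs : List String) (s : PySem.Set String) (y : String) :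
    y ∈ globs.foldl
        (fun acc pattern =>
          let toks := bParse (pattern.toList.length + 1) pattern.toList
          PySem.Set.update acc (paths.filter (fun p => bMatch toks p.toList))) s ↔
      y ∈ s ∨ (y ∈ paths ∧ ∃ g ∈ globs, bMatch (bParse (g.toList.length + 1) g.toList) y.toList = true) := by
  induction globs generalizing s with
  | nil => simp
  | cons g t ih =>
    simp only [List.foldl_cons, ih, PySem.Set.mem_update, List.mem_filter, List.mem_cons]
    constructor
    · rintro ((h | ⟨hy, hg⟩) | ⟨hy, g', hg', hm⟩)
      · exact Or.inl h
      · exact Or.inr ⟨hy, g, Or.inl rfl, hg⟩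
      · exact Or.inr ⟨hy, g', Or.inr hg', hm⟩
    · rintro (h | ⟨hy, g', (rfl | hg'), hm⟩)
      · exact Or.inl (Or.inl h)
      · exact Or.inl (Or.inr ⟨hy, hm⟩)
      · exact Or.inr ⟨hy, g', hg', hm⟩

theorem pvNodupFoldB (paths globs : List String) (s : PySem.Set String) (hs : s.Nodup) :
    (globs.foldl
        (fun acc pattern =>
          let toks := bParse (pattern.toList.length + 1) pattern.toList
          PySem.Set.update acc (paths.filter (fun p => bMatch toks p.toList))) s).Nodup := by
  induction globs generalizing s with
  | nil => simpa
  | cons g t ih => exact ih _ (PySem.Set.nodup_update _ _ hs)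


-- ===== VERDICT (by name: the statement is the Claim_ definition above) =====
theorem match_globs_spec : Claim_equal_match_globs := by
  intro paths globs _ hpre
  unfold Pre_match_globs at hpre
  unfold Spec_match_globs match_globs match_globs_alt
  apply PySem.List.sorted_eq_sorted_of_perm _ _ _ (fun a b h => h)
  rw [List.perm_ext_iff_of_nodup
    (pvNodupFoldA paths globs PySem.Set.empty List.nodup_nil)
    (pvNodupFoldB paths globs PySem.Set.empty List.nodup_nil)]
  intro y
  rw [pvMemFoldA, pvMemFoldB]
  have hco : ∀ g ∈ globs, pvFnmatch y g = bMatch (bParse (g.toList.length + 1) g.toList) y.toList := by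
    intro g hg
    exact fnmatch_rel y g ((List.all_eq_true.mp hpre) g hg)
  constructor
  · rintro (h | ⟨hy, g, hg, hm⟩)
    · exact Or.inl h
    · exact Or.inr ⟨hy, g, hg, by rw [← hco g hg]; exact hm⟩
  · rintro (h | ⟨hy, g, hg, hm⟩)
    · exact Or.inl h
    · exact Or.inr ⟨hy, g, hg, by rw [hco g hg]; exact hm⟩
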